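-- pv_equiv track=rewrite | github.com/ysparrk/Algorithm | 프로그래머스/2/258711. 도넛과 막대 그래프/도넛과 막대 그래프.py | solution
-- ===== SOURCE A (Python) =====
-- def solution(edges):
--
--     # 0. setting
--     rlt = [0, 0, 0, 0]
--     cnt_edges = {}
--
--
--     # 1.
--     def count_edges():
--         # [out, in] 으로 저장
--         for a, b in edges:
--             if a not in cnt_edges:
--                 cnt_edges[a] = [0, 0]
--
--             if b not in cnt_edges:
--                 cnt_edges[b] = [0, 0]
--
--             cnt_edges[a][0] += 1
--             cnt_edges[b][1] += 1
--
--
--     # 2.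
--     def get_result():
--         '''
--         1) 생성된 정점
--         - out 2개 이상, in 0
--         2) 도넛
--         - 모두 out 1, in 1
--         - 생성된 정점에 이어진 정점 out 1, in 2  -> 하지만, 8자와 겹칠 수 있음
--         3) 막대
--         - 하나의 정점이 out 0, in 1 이상
--         - 나머지 out 1, in 1
--         4) 8자
--         - 가운데 정점 out 2 이상, in 2 이상
--         - 나머지 out1, in 1
--         '''
--
--         for key, value in cnt_edges.items():
--
--             if value[0] >= 2 and value[1] == 0:
--                 rlt[0] = key
--             elif value[0] == 0 and value[1] >= 1:
--                 rlt[2] += 1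
--             elif value[0] >= 2 and value[1] >= 2:
--                 rlt[3] += 1
--
--         rlt[1] = cnt_edges[rlt[0]][0] - (rlt[2] + rlt[3])
--
--
--     # 3. result
--     count_edges()
--     get_result()
--
--
--     return rlt
-- ===== SOURCE B (Python) =====
-- def solution(edges):
--     srcs = sorted(a for a, b in edges)
--     tgts = sorted(b for a, b in edges)
--
--     # merge-scan the two sorted lists: each run of equal sources gives one
--     # node's out-degree; the target pointer advances in step to give its in-degree
--     root = 0
--     eights = 0
--     i = j = 0
--     while i < len(srcs):
--         s = srcs[i]
--         out = 0
--         while i < len(srcs) and srcs[i] == s: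
--             i += 1
--             out += 1
--         while j < len(tgts) and tgts[j] < s:
--             j += 1
--         ind = 0
--         while j < len(tgts) and tgts[j] == s:
--             j += 1
--             ind += 1
--         if out >= 2:
--             if ind == 0:
--                 root = s
--             elif ind >= 2:
--                 eights += 1
--
--     # second merge-scan: distinct targets that never occur as a source
--     sticks = 0
--     i = j = 0
--     while j < len(tgts):
--         t = tgts[j]
--         while i < len(srcs) and srcs[i] < t:
--             i += 1
--         if i == len(srcs) or srcs[i] != t:
--             sticks += 1
--         while j < len(tgts) and tgts[j] == t:
--             j += 1
--
--     rout = 0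
--     for s in srcs:
--         if s == root:
--             rout += 1
--     return [root, rout - sticks - eights, sticks, eights]
-- ===== Notes on version B (the rewrite author's own statement) =====
-- stated objective: alternative
-- what changed: B builds no dictionary at all: it sorts the source and target endpoint lists once and classifies nodes by two-pointer merge scans over the sorted lists (run lengths are the out-degrees, a synchronized target pointer yields the in-degrees, a second merge finds targets missing from the sources), where A fills a hash map of mutable [out,in] pairs and classifies each key with an if/elif chain.
-- outside the precondition, e.g. on solution([[4, 5], [4, 6], [1, 2], [1, 3]]): A returns [1, -2, 4, 0], B returns [4, -2, 4, 0]
import Mathlib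
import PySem

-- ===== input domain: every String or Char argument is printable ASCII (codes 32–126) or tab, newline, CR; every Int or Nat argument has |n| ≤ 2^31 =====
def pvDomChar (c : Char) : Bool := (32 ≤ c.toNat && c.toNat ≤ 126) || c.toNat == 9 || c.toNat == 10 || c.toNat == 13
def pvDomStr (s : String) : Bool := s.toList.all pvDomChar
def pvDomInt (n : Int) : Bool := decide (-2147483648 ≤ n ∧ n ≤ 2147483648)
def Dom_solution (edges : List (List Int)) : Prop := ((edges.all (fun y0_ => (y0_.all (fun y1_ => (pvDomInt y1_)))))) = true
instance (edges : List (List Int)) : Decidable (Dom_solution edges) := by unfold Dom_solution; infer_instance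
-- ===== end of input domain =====

-- B builds no dictionary: it sorts the source and target endpoint lists once and classifies the
-- nodes by two-pointer merge scans over the sorted lists, where A fills a dict of mutable
-- [out,in] pairs and classifies each key with an if/elif chain; objective: alternative.


-- ===== PORT A =====
-- the body of A's count_edges loop; the `[0,0]` value lists are ported as pairs (out, in)
def pvStepA (d : PySem.Dict Int (Int × Int)) (e : List Int) : PySem.Dict Int (Int × Int) :=
  match e with
  | [a, b] =>
    let d1 := if d.contains a then d else d.insert a (0, 0)     -- if a not in cnt_edges
    let d2 := if d1.contains b then d1 else d1.insert b (0, 0)  -- if b not in cnt_edges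
    let d3 := d2.modify a (0, 0) (fun p => (p.1 + 1, p.2))      -- cnt_edges[a][0] += 1
    d3.modify b (0, 0) (fun p => (p.1, p.2 + 1))                -- cnt_edges[b][1] += 1
  | _ => d  -- Python raises ValueError on unpacking here; Pre_solution excludes it

-- the body of A's get_result loop over cnt_edges.items(); state = (rlt[0], rlt[1], rlt[2], rlt[3])
def pvStepR (r : Int × Int × Int × Int) (kv : Int × (Int × Int)) : Int × Int × Int × Int :=
  if 2 ≤ kv.2.1 ∧ kv.2.2 = 0 then (kv.1, r.2.1, r.2.2.1, r.2.2.2)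
  else if kv.2.1 = 0 ∧ 1 ≤ kv.2.2 then (r.1, r.2.1, r.2.2.1 + 1, r.2.2.2)
  else if 2 ≤ kv.2.1 ∧ 2 ≤ kv.2.2 then (r.1, r.2.1, r.2.2.1, r.2.2.2 + 1)
  else r

def solution (edges : List (List Int)) : List Int :=
  let cnt := edges.foldl pvStepA PySem.Dict.empty
  let r := cnt.items.foldl pvStepR (0, 0, 0, 0)
  -- rlt[1] = cnt_edges[rlt[0]][0] - (rlt[2] + rlt[3]); KeyError when rlt[0] is absent — excluded by Pre_
  let out0 := (cnt.getD r.1 (0, 0)).1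
  [r.1, out0 - (r.2.2.1 + r.2.2.2), r.2.2.1, r.2.2.2]

-- ===== PORT B =====
-- `while i < len(l) and l[i] == s: i += 1` consuming a leading run: (run length, rest of the list)
def pvSpan (s : Int) : List Int → Nat × List Int
  | [] => (0, [])
  | x :: xs =>
    if x = s then
      let p := pvSpan s xs
      (p.1 + 1, p.2)
    else (0, x :: xs)

-- `while j < len(l) and l[j] < s: j += 1`
def pvDropLt (s : Int) : List Int → List Int
  | [] => []
  | x :: xs => if x < s then pvDropLt s xs else x :: xs

lemma pvSpan_snd_length (s : Int) (l : List Int) : (pvSpan s l).2.length ≤ l.length := by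
  induction l with
  | nil => simp [pvSpan]
  | cons x xs ih =>
    simp only [pvSpan]
    split_ifs
    · exact le_trans ih (Nat.le_succ _)
    · exact le_refl _

-- B's first while loop: runs over the sorted sources, target pointer advanced in step
def pvScan : List Int → List Int → Int → Int → Int × Int
  | [], _, root, eights => (root, eights)
  | s :: rest, tg, root, eights =>
    let p := pvSpan s rest                    -- rest of the source run; out = p.1 + 1
    let q := pvSpan s (pvDropLt s tg)         -- skip targets < s, count targets == s (ind = q.1)
    let root' := if 2 ≤ p.1 + 1 ∧ q.1 = 0 then s else root
    let eights' := if 2 ≤ p.1 + 1 ∧ q.1 ≠ 0 ∧ 2 ≤ q.1 then eights + 1 else eights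
    pvScan p.2 q.2 root' eights'
termination_by sr _ _ _ => sr.length
decreasing_by
  simpa using Nat.lt_succ_of_le (pvSpan_snd_length s rest)

-- B's second while loop: distinct targets that never occur as a source
def pvSticks : List Int → List Int → Int
  | _, [] => 0
  | sr, t :: tr =>
    let sr1 := pvDropLt t sr
    let miss : Int := if sr1.head? = some t then 0 else 1   -- i == len(srcs) or srcs[i] != t
    miss + pvSticks sr1 (pvSpan t tr).2
termination_by _ tg => tg.length
decreasing_by
  simpa using Nat.lt_succ_of_le (pvSpan_snd_length t tr)

def solution_alt (edges : List (List Int)) : List Int :=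
  -- the generator unpacking `for a, b in edges` raises on malformed rows; Pre_solution excludes them
  let srcs := PySem.List.sorted (edges.map (fun e => e.headD 0)) (fun x => x) false
  let tgts := PySem.List.sorted (edges.map (fun e => e.getD 1 0)) (fun x => x) false
  let re := pvScan srcs tgts 0 0
  let sticks := pvSticks srcs tgts
  let rout := srcs.foldl (fun c s => if s = re.1 then c + 1 else c) (0 : Int)
  [re.1, rout - sticks - re.2, sticks, re.2]

-- ===== PRECONDITION & SPEC =====
def pvSrcList (edges : List (List Int)) : List Int := edges.map (fun e => e.headD 0)
def pvTgtList (edges : List (List Int)) : List Int := edges.map (fun e => e.getD 1 0)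
def pvIsRoot (edges : List (List Int)) (x : Int) : Bool :=
  decide (2 ≤ (pvSrcList edges).count x) && decide ((pvTgtList edges).count x = 0)
-- Pre_ excludes (i) inputs where A raises: a malformed inner list (not length 2, ValueError on
-- unpacking) or a well-formed list with no root candidate (out-degree ≥ 2, in-degree 0) and no
-- node 0, where A's lookup cnt_edges[rlt[0]] with the initial rlt[0] = 0 raises KeyError; and
-- (ii) inputs with two or more root candidates, where which candidate is reported is an
-- accidental tie-break (A keeps the last one in dict insertion order, B the last in sorted order).
def Pre_solution (edges : List (List Int)) : Prop :=
  (∀ e ∈ edges, e.length = 2) ∧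
  (((PySem.Set.ofList (pvSrcList edges)).filter (pvIsRoot edges)) ≠ [] ∨
    0 ∈ pvSrcList edges ∨ 0 ∈ pvTgtList edges) ∧
  ((PySem.Set.ofList (pvSrcList edges)).filter (pvIsRoot edges)).length ≤ 1
instance (edges : List (List Int)) : Decidable (Pre_solution edges) := by unfold Pre_solution; infer_instance

def pvWitness_solution : List (List Int) := [[0, 1], [0, 2]]

def Spec_solution (edges : List (List Int)) (out : List Int) : Prop := out = solution_alt edges
instance (edges : List (List Int)) (out : List Int) : Decidable (Spec_solution edges out) := by unfold Spec_solution; infer_instance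

-- ===== CLAIM (what is proved, stated in full; the proofs are below) =====
def Claim_equal_solution : Prop := ∀ (edges : List (List Int)), Dom_solution edges → Pre_solution edges → Spec_solution edges (solution edges)

-- ===== LEMMAS AND PROOFS =====

-- edge lists whose members all have length 2, seen as pair lists
def pvPairs (edges : List (List Int)) : List (Int × Int) :=
  edges.map (fun e => (e.headD 0, e.getD 1 0))

lemma pvEdges_eq_map_pairs (edges : List (List Int)) (h : ∀ e ∈ edges, e.length = 2) :
    edges = (pvPairs edges).map (fun p => [p.1, p.2]) := by
  induction edges with
  | nil => rfl
  | cons e es ih =>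
    have he : e.length = 2 := h e (by simp)
    match e, he with
    | [a, b], _ =>
      simpa [pvPairs] using ih (fun e' he' => h e' (by simp [he']))

-- ---- characterization of one step of A's count_edges loop ----
lemma pvStepA_pair (d : PySem.Dict Int (Int × Int)) (a b : Int) :
    (∀ x, (pvStepA d [a, b]).getD x (0, 0) =
      ((d.getD x (0, 0)).1 + (if x = a then 1 else 0), (d.getD x (0, 0)).2 + (if x = b then 1 else 0)))
    ∧ (pvStepA d [a, b]).keys = PySem.Set.add (PySem.Set.add d.keys a) b := by
  have hgd : ∀ (d : PySem.Dict Int (Int × Int)) (c x : Int),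
      ((if d.contains c then d else d.insert c (0, 0)).getD x (0, 0)) = d.getD x (0, 0) := by
    intro d c x
    by_cases hc : d.contains c
    · simp [hc]
    · simp only [Bool.not_eq_true] at hc
      rw [if_neg (by simp [hc]), PySem.Dict.getD_insert]
      split_ifs with hx
      · subst hx; rw [PySem.Dict.getD_of_not_contains d _ hc]
      · rfl
  have hkadd : ∀ (d : PySem.Dict Int (Int × Int)) (c : Int),
      (if d.contains c then d else d.insert c (0, 0)).keys = PySem.Set.add d.keys c := by
    intro d c
    by_cases hc : d.contains c
    · rw [if_pos hc, PySem.Set.add_of_mem ((PySem.Dict.contains_iff_mem_keys d c).1 hc)]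
    · simp only [Bool.not_eq_true] at hc
      rw [if_neg (by simp [hc]), PySem.Dict.keys_insert_of_not_contains d _ hc,
        PySem.Set.add_of_not_mem]
      intro hm
      exact absurd ((PySem.Dict.contains_iff_mem_keys d c).2 hm) (by simp [hc])
  set d1 : PySem.Dict Int (Int × Int) := if d.contains a then d else d.insert a (0, 0) with hd1
  set d2 : PySem.Dict Int (Int × Int) := if d1.contains b then d1 else d1.insert b (0, 0) with hd2
  set d3 : PySem.Dict Int (Int × Int) := d2.modify a (0, 0) (fun p => (p.1 + 1, p.2)) with hd3
  set d4 : PySem.Dict Int (Int × Int) := d3.modify b (0, 0) (fun p => (p.1, p.2 + 1)) with hd4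
  have hstep : pvStepA d [a, b] = d4 := rfl
  rw [hstep]
  constructor
  · intro x
    rw [hd4, PySem.Dict.getD_modify, hd3, PySem.Dict.getD_modify, PySem.Dict.getD_modify,
      hd2, hgd, hgd, hd1, hgd, hgd]
    by_cases hxb : x = b <;> by_cases hxa : x = a <;> by_cases hab : a = b <;> simp_all
  · have hk2 : d2.keys = PySem.Set.add (PySem.Set.add d.keys a) b := by
      rw [hd2, hkadd, hd1, hkadd]
    have hainD2 : d2.contains a = true := by
      refine (PySem.Dict.contains_iff_mem_keys _ _).2 ?_
      rw [hk2]
      exact (PySem.Set.mem_add _ _ _).2 (Or.inl ((PySem.Set.mem_add _ _ _).2 (Or.inr rfl)))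
    have hk3 : d3.keys = d2.keys := by
      rw [hd3, PySem.Dict.keys_modify, PySem.Dict.keys_insert_of_contains _ _ hainD2]
    have hbinD3 : d3.contains b = true := by
      rw [hd3, PySem.Dict.contains_modify]
      refine Bool.or_eq_true_iff.2 (Or.inr ?_)
      refine (PySem.Dict.contains_iff_mem_keys _ _).2 ?_
      rw [hk2]
      exact (PySem.Set.mem_add _ _ _).2 (Or.inr rfl)
    rw [hd4, PySem.Dict.keys_modify, PySem.Dict.keys_insert_of_contains _ _ hbinD3, hk3, hk2]

-- ---- characterization of A's count_edges fold ----
lemma pvFoldA_char (ps : List (Int × Int)) :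
    ∀ (d : PySem.Dict Int (Int × Int)),
      ((∀ x, (ps.foldl (fun d p => pvStepA d [p.1, p.2]) d).getD x (0, 0) =
          ((d.getD x (0, 0)).1 + ((ps.map Prod.fst).count x : Int),
           (d.getD x (0, 0)).2 + ((ps.map Prod.snd).count x : Int)))
       ∧ (ps.foldl (fun d p => pvStepA d [p.1, p.2]) d).keys =
           (ps.flatMap (fun q => [q.1, q.2])).foldl PySem.Set.add d.keys) := by
  induction ps with
  | nil => intro d; simp
  | cons p ps ih =>
    intro d
    obtain ⟨ha1, ha2⟩ := pvStepA_pair d p.1 p.2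
    obtain ⟨ih1, ih2⟩ := ih (pvStepA d [p.1, p.2])
    constructor
    · intro x
      simp only [List.foldl_cons]
      rw [ih1 x, ha1 x]
      simp only [List.map_cons, List.count_cons]
      simp only [Prod.mk.injEq, beq_iff_eq]
      refine ⟨?_, ?_⟩ <;>
      · by_cases h1 : x = p.1 <;> by_cases h2 : x = p.2 <;> simp_all <;> omega
    · simp only [List.foldl_cons]
      rw [ih2, ha2, List.flatMap_cons, List.foldl_append]
      rfl

-- ---- characterization of A's get_result fold ----
def pvPB (kv : Int × (Int × Int)) : Bool := decide (2 ≤ kv.2.1 ∧ kv.2.2 = 0)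
def pvQB (kv : Int × (Int × Int)) : Bool := decide (kv.2.1 = 0 ∧ 1 ≤ kv.2.2)
def pvRB (kv : Int × (Int × Int)) : Bool := decide (2 ≤ kv.2.1 ∧ 2 ≤ kv.2.2)

lemma pvFoldR_char (l : List (Int × (Int × Int))) :
    ∀ r0 : Int × Int × Int × Int,
      l.foldl pvStepR r0 =
        (((l.filter pvPB).map Prod.fst).getLastD r0.1, r0.2.1,
         r0.2.2.1 + (l.countP pvQB : Int), r0.2.2.2 + (l.countP pvRB : Int)) := by
  induction l with
  | nil => intro r0; simp
  | cons kv l ih =>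
    intro r0
    rw [List.foldl_cons, ih]
    by_cases hP : 2 ≤ kv.2.1 ∧ kv.2.2 = 0
    · have hpb : pvPB kv = true := by simp only [pvPB, decide_eq_true_eq]; exact hP
      have hqb : pvQB kv = false := by simp only [pvQB, decide_eq_false_iff_not]; omega
      have hrb : pvRB kv = false := by simp only [pvRB, decide_eq_false_iff_not]; omega
      rw [List.filter_cons_of_pos hpb, List.map_cons, List.getLastD_cons,
        List.countP_cons, List.countP_cons, hqb, hrb]
      simp [pvStepR, hP]
    · by_cases hQ : kv.2.1 = 0 ∧ 1 ≤ kv.2.2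
      · have hpb : pvPB kv = false := by simp only [pvPB, decide_eq_false_iff_not]; omega
        have hqb : pvQB kv = true := by simp only [pvQB, decide_eq_true_eq]; exact hQ
        have hrb : pvRB kv = false := by simp only [pvRB, decide_eq_false_iff_not]; omega
        rw [List.filter_cons_of_neg (by simp [hpb]), List.countP_cons, List.countP_cons, hqb, hrb]
        simp only [pvStepR, if_neg hP, if_pos hQ, Prod.mk.injEq]
        refine ⟨trivial, trivial, ?_, ?_⟩ <;> push_cast <;> ring
      · by_cases hR : 2 ≤ kv.2.1 ∧ 2 ≤ kv.2.2
        · have hpb : pvPB kv = false := by simp only [pvPB, decide_eq_false_iff_not]; omega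
          have hqb : pvQB kv = false := by simp only [pvQB, decide_eq_false_iff_not]; omega
          have hrb : pvRB kv = true := by simp only [pvRB, decide_eq_true_eq]; exact hR
          rw [List.filter_cons_of_neg (by simp [hpb]), List.countP_cons, List.countP_cons, hqb, hrb]
          simp only [pvStepR, if_neg hP, if_neg hQ, if_pos hR, Prod.mk.injEq]
          refine ⟨trivial, trivial, ?_, ?_⟩ <;> push_cast <;> ring
        · have hpb : pvPB kv = false := by simp only [pvPB, decide_eq_false_iff_not]; omega
          have hqb : pvQB kv = false := by simp only [pvQB, decide_eq_false_iff_not]; omega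
          have hrb : pvRB kv = false := by simp only [pvRB, decide_eq_false_iff_not]; omega
          rw [List.filter_cons_of_neg (by simp [hpb]), List.countP_cons, List.countP_cons, hqb, hrb]
          simp [pvStepR, hP, hQ, hR]

-- ---- counting over two nodup lists that carve out the same set ----
lemma pvCountP_eq_of_set_eq {l1 l2 : List Int} {p1 p2 : Int → Bool}
    (h1 : l1.Nodup) (h2 : l2.Nodup)
    (h : ∀ x, (x ∈ l1 ∧ p1 x = true) ↔ (x ∈ l2 ∧ p2 x = true)) :
    l1.countP p1 = l2.countP p2 := by
  rw [List.countP_eq_length_filter, List.countP_eq_length_filter]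
  apply List.Perm.length_eq
  apply (List.perm_ext_iff_of_nodup (h1.filter _) (h2.filter _)).2
  intro a; simp only [List.mem_filter]; exact h a

-- ---- two filters of nodup lists with the same members are equal once one has ≤ 1 element ----
lemma pvFilter_eq_of_short {l1 l2 : List Int} (h1 : l1.Nodup) (h2 : l2.Nodup)
    (h : ∀ x, x ∈ l1 ↔ x ∈ l2) (hshort : l1.length ≤ 1) : l1 = l2 := by
  have hperm : l2.Perm l1 := (List.perm_ext_iff_of_nodup h2 h1).2 (fun a => (h a).symm)
  match l1, hshort with
  | [], _ => exact (List.Perm.eq_nil hperm).symm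
  | [r], _ => exact (List.perm_singleton.1 hperm).symm

-- ---- the distinct values of a sorted list, in order ----
def pvHeads : List Int → List Int
  | [] => []
  | x :: xs => x :: pvHeads (xs.filter (fun y => decide (x < y)))
termination_by l => l.length
decreasing_by
  simp only [List.length_unattach, List.length_cons]
  exact Nat.lt_succ_of_le (le_trans (List.length_filter_le _ _) (by simp))

lemma pvHeads_facts (n : Nat) : ∀ l : List Int, l.length ≤ n → l.Pairwise (· ≤ ·) →
    ((∀ x, x ∈ pvHeads l ↔ x ∈ l) ∧ (pvHeads l).Nodup) := by
  induction n with
  | zero =>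
    intro l hn _
    rw [List.length_eq_zero_iff.1 (Nat.le_zero.1 hn)]
    simp [pvHeads]
  | succ n ih =>
    intro l hn hs
    match l with
    | [] => simp [pvHeads]
    | y :: ys =>
      have hys : ys.Pairwise (· ≤ ·) := (List.pairwise_cons.1 hs).2
      have hge := (List.pairwise_cons.1 hs).1
      have hlen : (ys.filter (fun z => decide (y < z))).length ≤ n := by
        have := List.length_filter_le (fun z => decide (y < z)) ys
        simp only [List.length_cons] at hn
        omega
      obtain ⟨ihm, ihn⟩ := ih _ hlen (hys.filter _)
      have hheads : pvHeads (y :: ys) = y :: pvHeads (ys.filter (fun z => decide (y < z))) := by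
        simp [pvHeads]
      constructor
      · intro x
        rw [hheads]
        simp only [List.mem_cons]
        rw [ihm x]
        constructor
        · rintro (rfl | hx)
          · exact Or.inl rfl
          · exact Or.inr (List.mem_of_mem_filter hx)
        · rintro (rfl | hx)
          · exact Or.inl rfl
          · by_cases hxy : x = y
            · exact Or.inl hxy
            · have hlt : y < x := lt_of_le_of_ne (hge x hx) (fun h => hxy h.symm)
              exact Or.inr (List.mem_filter.2 ⟨hx, by simpa using hlt⟩)
      · rw [hheads]
        refine List.nodup_cons.2 ⟨?_, ihn⟩
        intro hy
        have := (List.mem_filter.1 ((ihm y).1 hy)).2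
        simp at this

lemma pvMem_heads_iff (l : List Int) (hs : l.Pairwise (· ≤ ·)) (x : Int) :
    x ∈ pvHeads l ↔ x ∈ l :=
  (pvHeads_facts l.length l (le_refl _) hs).1 x

lemma pvHeads_nodup (l : List Int) (hs : l.Pairwise (· ≤ ·)) : (pvHeads l).Nodup :=
  (pvHeads_facts l.length l (le_refl _) hs).2

-- ---- pvSpan / pvDropLt on sorted lists ----
lemma pvSpan_sorted (s : Int) (l : List Int) (hs : l.Pairwise (· ≤ ·)) (hge : ∀ x ∈ l, s ≤ x) :
    pvSpan s l = (l.count s, l.filter (fun y => decide (s < y))) := by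
  induction l with
  | nil => simp [pvSpan]
  | cons x xs ih =>
    by_cases hx : x = s
    · subst hx
      rw [pvSpan, if_pos rfl, ih (List.pairwise_cons.1 hs).2 (fun y hy => hge y (by simp [hy]))]
      simp
    · have hlt : s < x := lt_of_le_of_ne (hge x (by simp)) (fun h => hx h.symm)
      have hall : ∀ y ∈ x :: xs, s < y := by
        intro y hy
        rcases List.mem_cons.1 hy with rfl | hy
        · exact hlt
        · exact lt_of_lt_of_le hlt ((List.pairwise_cons.1 hs).1 y hy)
      rw [pvSpan, if_neg hx]
      refine Prod.ext ?_ ?_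
      · show 0 = (x :: xs).count s
        rw [eq_comm, List.count_eq_zero]
        intro hmem
        exact absurd (hall s hmem) (lt_irrefl s)
      · show x :: xs = (x :: xs).filter (fun y => decide (s < y))
        rw [eq_comm, List.filter_eq_self]
        intro y hy
        simpa using hall y hy

lemma pvDropLt_sorted (s : Int) (l : List Int) (hs : l.Pairwise (· ≤ ·)) :
    pvDropLt s l = l.filter (fun y => decide (s ≤ y)) := by
  induction l with
  | nil => rfl
  | cons x xs ih =>
    by_cases hx : x < s
    · rw [pvDropLt, if_pos hx, List.filter_cons_of_neg (by simpa using hx),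
        ih (List.pairwise_cons.1 hs).2]
    · rw [not_lt] at hx
      rw [pvDropLt, if_neg (by omega),
        List.filter_cons_of_pos (by simpa using hx),
        List.filter_eq_self.2
          (fun y hy => by simpa using le_trans hx ((List.pairwise_cons.1 hs).1 y hy))]

lemma pvHead_dropLt (t : Int) (l : List Int) (hs : l.Pairwise (· ≤ ·)) :
    ((pvDropLt t l).head? = some t) ↔ t ∈ l := by
  induction l with
  | nil => simp [pvDropLt]
  | cons x xs ih =>
    by_cases hx : x < t
    · rw [pvDropLt, if_pos hx, ih (List.pairwise_cons.1 hs).2]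
      simp only [List.mem_cons]
      constructor
      · exact Or.inr
      · rintro (rfl | h)
        · omega
        · exact h
    · rw [not_lt] at hx
      rw [pvDropLt, if_neg (by omega)]
      simp only [List.head?_cons, Option.some.injEq, List.mem_cons]
      constructor
      · intro h; exact Or.inl h.symm
      · rintro (rfl | h)
        · rfl
        · have := (List.pairwise_cons.1 hs).1 t h
          omega

-- count of a value surviving a filter it satisfies
lemma pvCount_filter_of_pos {l : List Int} {p : Int → Bool} {a : Int} (h : p a = true) :
    (l.filter p).count a = l.count a := by
  induction l with
  | nil => rfl
  | cons x xs ih =>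
    by_cases hx : p x = true
    · rw [List.filter_cons_of_pos hx, List.count_cons, List.count_cons, ih]
    · rw [List.filter_cons_of_neg (by simp [hx])]
      have hxa : ¬ (x == a) = true := by
        intro hb
        rw [show x = a from by simpa using hb] at hx
        exact hx h
      rw [List.count_cons, if_neg hxa, ih]
      omega

-- ---- characterization of B's first merge scan ----
lemma pvScan_char (n : Nat) : ∀ (sr tg : List Int) (root eights : Int), sr.length ≤ n →
    sr.Pairwise (· ≤ ·) → tg.Pairwise (· ≤ ·) →
    pvScan sr tg root eights =
      (((pvHeads sr).filter (fun x => decide (2 ≤ sr.count x ∧ tg.count x = 0))).getLastD root,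
       eights + (((pvHeads sr).countP (fun x => decide (2 ≤ sr.count x ∧ 2 ≤ tg.count x))) : Int)) := by
  induction n with
  | zero =>
    intro sr tg root eights hn _ _
    rw [List.length_eq_zero_iff.1 (Nat.le_zero.1 hn)]
    simp [pvScan, pvHeads]
  | succ n ih =>
    intro sr tg root eights hn hsr htg
    match sr with
    | [] => simp [pvScan, pvHeads]
    | s :: rest =>
      have hrest : rest.Pairwise (· ≤ ·) := (List.pairwise_cons.1 hsr).2
      have hge : ∀ x ∈ rest, s ≤ x := (List.pairwise_cons.1 hsr).1
      set rest' := rest.filter (fun y => decide (s < y)) with hrest'def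
      set tg' := tg.filter (fun y => decide (s < y)) with htg'def
      have hspan : pvSpan s rest = (rest.count s, rest') := pvSpan_sorted s rest hrest hge
      have hdrop : pvDropLt s tg = tg.filter (fun y => decide (s ≤ y)) := pvDropLt_sorted s tg htg
      have htg1 : (tg.filter (fun y => decide (s ≤ y))).Pairwise (· ≤ ·) := htg.filter _
      have hcnt1 : (tg.filter (fun y => decide (s ≤ y))).count s = tg.count s :=
        pvCount_filter_of_pos (by simp)
      have htg2 : (tg.filter (fun y => decide (s ≤ y))).filter (fun y => decide (s < y)) = tg' := by
        rw [htg'def, List.filter_filter]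
        apply List.filter_congr
        intro y _
        by_cases h : s < y
        · simp only [h, decide_true]
          simp [le_of_lt h]
        · simp [h]
      have hspan2 : pvSpan s (pvDropLt s tg) = (tg.count s, tg') := by
        rw [hdrop, pvSpan_sorted s _ htg1 (fun x hx => by simpa using (List.mem_filter.1 hx).2),
          hcnt1, htg2]
      -- facts about members of pvHeads rest'
      have hmemf : ∀ x ∈ pvHeads rest', s < x ∧ x ∈ rest := by
        intro x hx
        have hxm := (pvMem_heads_iff rest' (hrest.filter _) x).1 hx
        rw [hrest'def] at hxm
        exact ⟨by simpa using (List.mem_filter.1 hxm).2, List.mem_of_mem_filter hxm⟩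
      have hcount_sr : ∀ x ∈ pvHeads rest', rest'.count x = (s :: rest).count x := by
        intro x hx
        obtain ⟨hlt, _⟩ := hmemf x hx
        rw [hrest'def, pvCount_filter_of_pos (by simpa using hlt), List.count_cons,
          if_neg (by simp; omega)]
        omega
      have hcount_tg : ∀ x ∈ pvHeads rest', tg'.count x = tg.count x := by
        intro x hx
        obtain ⟨hlt, _⟩ := hmemf x hx
        rw [htg'def, pvCount_filter_of_pos (by simpa using hlt)]
      -- unfold one step of pvScan
      have hstep : pvScan (s :: rest) tg root eights =
          pvScan rest' tg'
            (if 2 ≤ rest.count s + 1 ∧ tg.count s = 0 then s else root)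
            (if 2 ≤ rest.count s + 1 ∧ tg.count s ≠ 0 ∧ 2 ≤ tg.count s then eights + 1 else eights) := by
        rw [pvScan]
        simp only [hspan, hspan2]
      have hlen' : rest'.length ≤ n := by
        have h1 : rest'.length ≤ rest.length := by
          rw [hrest'def]; exact List.length_filter_le _ _
        simp only [List.length_cons] at hn
        omega
      rw [hstep, ih rest' tg' _ _ hlen' (hrest.filter _) (htg.filter _)]
      -- align the filters/counts over pvHeads rest' with the outer lists
      have hfiltereq :
          (pvHeads rest').filter (fun x => decide (2 ≤ rest'.count x ∧ tg'.count x = 0)) =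
          (pvHeads rest').filter (fun x => decide (2 ≤ (s :: rest).count x ∧ tg.count x = 0)) := by
        apply List.filter_congr
        intro x hx
        rw [hcount_sr x hx, hcount_tg x hx]
      have hcountPeq :
          (pvHeads rest').countP (fun x => decide (2 ≤ rest'.count x ∧ 2 ≤ tg'.count x)) =
          (pvHeads rest').countP (fun x => decide (2 ≤ (s :: rest).count x ∧ 2 ≤ tg.count x)) := by
        apply List.countP_congr
        intro x hx
        rw [hcount_sr x hx, hcount_tg x hx]
      have hheads : pvHeads (s :: rest) = s :: pvHeads rest' := by
        simp only [pvHeads]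
        rw [hrest'def]
      have hcs : (s :: rest).count s = rest.count s + 1 := by
        rw [List.count_cons]
        simp
      rw [hfiltereq, hcountPeq, hheads]
      refine Prod.ext ?_ ?_
      · -- root component
        simp only [List.filter_cons]
        by_cases hP : 2 ≤ rest.count s + 1 ∧ tg.count s = 0
        · have hps : (decide (2 ≤ (s :: rest).count s ∧ tg.count s = 0)) = true := by
            simp only [decide_eq_true_eq]
            rw [hcs]
            exact hP
          rw [if_pos hP, hps, if_pos rfl, List.getLastD_cons]
        · have hps : (decide (2 ≤ (s :: rest).count s ∧ tg.count s = 0)) = false := by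
            simp only [decide_eq_false_iff_not]
            rw [hcs]
            exact hP
          rw [if_neg hP, hps, if_neg (by simp)]
      · -- eights component
        simp only [List.countP_cons]
        by_cases hC : 2 ≤ rest.count s + 1 ∧ tg.count s ≠ 0 ∧ 2 ≤ tg.count s
        · have hqs : (decide (2 ≤ (s :: rest).count s ∧ 2 ≤ tg.count s)) = true := by
            simp only [decide_eq_true_eq]
            rw [hcs]
            exact ⟨hC.1, hC.2.2⟩
          rw [if_pos hC, hqs, if_pos rfl]
          push_cast
          ring
        · have hqs : (decide (2 ≤ (s :: rest).count s ∧ 2 ≤ tg.count s)) = false := by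
            simp only [decide_eq_false_iff_not]
            rw [hcs]
            intro hcon
            exact hC ⟨hcon.1, by omega, hcon.2⟩
          rw [if_neg hC, hqs, if_neg (by simp)]
          push_cast
          ring

-- ---- characterization of B's second merge scan ----
lemma pvSticks_char (n : Nat) : ∀ (sr tg : List Int), tg.length ≤ n →
    sr.Pairwise (· ≤ ·) → tg.Pairwise (· ≤ ·) →
    pvSticks sr tg = (((pvHeads tg).countP (fun x => !(decide (x ∈ sr)))) : Int) := by
  induction n with
  | zero =>
    intro sr tg hn _ _
    rw [List.length_eq_zero_iff.1 (Nat.le_zero.1 hn)]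
    simp [pvSticks, pvHeads]
  | succ n ih =>
    intro sr tg hn hsr htg
    match tg with
    | [] => simp [pvSticks, pvHeads]
    | t :: tr =>
      have htr : tr.Pairwise (· ≤ ·) := (List.pairwise_cons.1 htg).2
      have hge : ∀ x ∈ tr, t ≤ x := (List.pairwise_cons.1 htg).1
      set tr' := tr.filter (fun y => decide (t < y)) with htr'def
      set sr1 := pvDropLt t sr with hsr1def
      have hspan : pvSpan t tr = (tr.count t, tr') := pvSpan_sorted t tr htr hge
      have hsr1 : sr1 = sr.filter (fun y => decide (t ≤ y)) := pvDropLt_sorted t sr hsr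
      have hsr1sorted : sr1.Pairwise (· ≤ ·) := by rw [hsr1]; exact hsr.filter _
      have hlen' : tr'.length ≤ n := by
        have h1 : tr'.length ≤ tr.length := by
          rw [htr'def]; exact List.length_filter_le _ _
        simp only [List.length_cons] at hn
        omega
      have hiff : (sr1.head? = some t) ↔ t ∈ sr := by
        rw [hsr1def]
        exact pvHead_dropLt t sr hsr
      have hstep : pvSticks sr (t :: tr) =
          (if sr1.head? = some t then (0 : Int) else 1) + pvSticks sr1 tr' := by
        rw [pvSticks]
        simp only [hspan, hsr1def]
      have hheads : pvHeads (t :: tr) = t :: pvHeads tr' := by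
        simp only [pvHeads]
        rw [htr'def]
      have hcongr : (pvHeads tr').countP (fun x => !(decide (x ∈ sr1))) =
          (pvHeads tr').countP (fun x => !(decide (x ∈ sr))) := by
        apply List.countP_congr
        intro x hx
        have hxm := (pvMem_heads_iff tr' (htr.filter _) x).1 hx
        have hlt : t < x := by
          rw [htr'def] at hxm
          simpa using (List.mem_filter.1 hxm).2
        have hmem1 : x ∈ sr1 ↔ x ∈ sr := by
          rw [hsr1, List.mem_filter]
          constructor
          · exact fun h => h.1
          · intro h
            refine ⟨h, by simp; omega⟩
        simp only [hmem1]
      rw [hstep, ih sr1 tr' hlen' hsr1sorted (htr.filter _), hcongr, hheads]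
      simp only [List.countP_cons]
      by_cases h : t ∈ sr
      · rw [if_pos (hiff.2 h)]
        have hqt : (!(decide (t ∈ sr))) = false := by simp [h]
        rw [hqt, if_neg (by simp)]
        push_cast
        ring
      · rw [if_neg (fun hh => h (hiff.1 hh))]
        have hqt : (!(decide (t ∈ sr))) = true := by simp [h]
        rw [hqt, if_pos rfl]
        push_cast
        ring

-- B's counting loop `for s in srcs: if s == root: rout += 1`
lemma pvFoldCountEq (l : List Int) (r : Int) : ∀ c : Int,
    l.foldl (fun c s => if s = r then c + 1 else c) c = c + (l.count r : Int) := by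
  induction l with
  | nil => intro c; simp
  | cons x xs ih =>
    intro c
    rw [List.foldl_cons, ih, List.count_cons]
    by_cases hx : x = r
    · rw [if_pos hx, if_pos (by simp [hx])]
      push_cast
      ring
    · rw [if_neg hx, if_neg (by simp [hx])]
      push_cast
      ring

-- ===== VERDICT (by name: the statement is the Claim_ definition above) =====
theorem solution_spec : Claim_equal_solution := by
  intro edges _hdom hpre
  obtain ⟨hlen, _hpre2, hpre3⟩ := hpre
  unfold Spec_solution
  set ps := pvPairs edges with hps
  have hedges := pvEdges_eq_map_pairs edges hlen
  set S := ps.map Prod.fst with hS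
  set T := ps.map Prod.snd with hT
  have hSsrc : pvSrcList edges = S := by
    rw [pvSrcList, hS, hps, pvPairs, List.map_map]
    rfl
  have hTtgt : pvTgtList edges = T := by
    rw [pvTgtList, hT, hps, pvPairs, List.map_map]
    rfl
  -- ---- A's dict ----
  obtain ⟨hA1, hA2⟩ := pvFoldA_char ps PySem.Dict.empty
  set cnt := ps.foldl (fun d p => pvStepA d [p.1, p.2]) PySem.Dict.empty with hcnt
  have hgetD : ∀ x, cnt.getD x (0, 0) = ((S.count x : Int), (T.count x : Int)) := by
    intro x; rw [hA1 x, hS, hT]; simp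
  have hKeq : cnt.keys = PySem.Set.ofList (ps.flatMap (fun q => [q.1, q.2])) := by
    rw [hA2, PySem.Dict.keys_empty, PySem.Set.ofList_eq_foldl]
  have hA3 : cnt.keys.Nodup := by rw [hKeq]; exact PySem.Set.nodup_ofList _
  have hmem : ∀ x, x ∈ cnt.keys ↔ x ∈ S ∨ x ∈ T := by
    intro x
    rw [hKeq, PySem.Set.mem_ofList, List.mem_flatMap, hS, hT]
    constructor
    · rintro ⟨q, hq, h⟩
      simp only [List.mem_cons, List.not_mem_nil, or_false] at h
      rcases h with rfl | rfl
      · exact Or.inl (List.mem_map_of_mem hq)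
      · exact Or.inr (List.mem_map_of_mem hq)
    · rintro (h | h) <;> obtain ⟨q, hq, rfl⟩ := List.mem_map.1 h
      · exact ⟨q, hq, by simp⟩
      · exact ⟨q, hq, by simp⟩
  have hitems : cnt.items = cnt.keys.map (fun k => (k, ((S.count k : Int), (T.count k : Int)))) := by
    rw [PySem.Dict.items_eq_map_keys cnt hA3 (0, 0)]
    exact List.map_congr_left (fun k _ => by rw [hgetD k])
  -- the three per-key predicates, as functions of the key
  set pK : Int → Bool := fun k => decide (2 ≤ (S.count k : Int) ∧ (T.count k : Int) = 0) with hpK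
  set qK : Int → Bool := fun k => decide ((S.count k : Int) = 0 ∧ 1 ≤ (T.count k : Int)) with hqK
  set rK : Int → Bool := fun k => decide (2 ≤ (S.count k : Int) ∧ 2 ≤ (T.count k : Int)) with hrK
  have hrootA : ((cnt.items.filter pvPB).map Prod.fst) = cnt.keys.filter pK := by
    rw [hitems, List.filter_map, List.map_map]
    have h1 : (Prod.fst ∘ fun k => (k, ((S.count k : Int), (T.count k : Int)))) = id := rfl
    have h2 : (pvPB ∘ fun k => (k, ((S.count k : Int), (T.count k : Int)))) = pK := rfl
    rw [h1, h2, List.map_id]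
  have hcountQ : cnt.items.countP pvQB = cnt.keys.countP qK := by
    rw [hitems, List.countP_map]
    rfl
  have hcountR : cnt.items.countP pvRB = cnt.keys.countP rK := by
    rw [hitems, List.countP_map]
    rfl
  -- A's result fold
  have hfoldR := pvFoldR_char cnt.items (0, 0, 0, 0)
  set rootV : Int := (cnt.keys.filter pK).getLastD 0 with hrootV
  set sA := cnt.keys.countP qK with hsA
  set eA := cnt.keys.countP rK with heA
  have hsolA : solution edges =
      [rootV, (S.count rootV : Int) - ((sA : Int) + (eA : Int)), (sA : Int), (eA : Int)] := by
    show (let cnt' := edges.foldl pvStepA PySem.Dict.empty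
          let r := cnt'.items.foldl pvStepR (0, 0, 0, 0)
          let out0 := (cnt'.getD r.1 (0, 0)).1
          [r.1, out0 - (r.2.2.1 + r.2.2.2), r.2.2.1, r.2.2.2]) = _
    have hcnt' : edges.foldl pvStepA PySem.Dict.empty = cnt := by
      conv_lhs => rw [hedges]
      rw [List.foldl_map]
    simp only [hcnt', hfoldR, hrootA, hcountQ, hcountR, ← hrootV, hgetD]
    norm_num
  -- ---- B's sorted lists ----
  set srcs := PySem.List.sorted (edges.map (fun e => e.headD 0)) (fun x => x) false with hsrcs
  set tgts := PySem.List.sorted (edges.map (fun e => e.getD 1 0)) (fun x => x) false with htgts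
  have hsrcsS : srcs = PySem.List.sorted S (fun x => x) false := by
    rw [hsrcs, show edges.map (fun e => e.headD 0) = S from by rw [← hSsrc]; rfl]
  have htgtsT : tgts = PySem.List.sorted T (fun x => x) false := by
    rw [htgts, show edges.map (fun e => e.getD 1 0) = T from by rw [← hTtgt]; rfl]
  have hsrcsPerm : srcs.Perm S := by rw [hsrcsS]; exact PySem.List.sorted_perm S _ false
  have htgtsPerm : tgts.Perm T := by rw [htgtsT]; exact PySem.List.sorted_perm T _ false
  have hsrcsSorted : srcs.Pairwise (· ≤ ·) := by
    rw [hsrcsS]; simpa using PySem.List.sorted_pairwise S (fun x : Int => x)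
  have htgtsSorted : tgts.Pairwise (· ≤ ·) := by
    rw [htgtsT]; simpa using PySem.List.sorted_pairwise T (fun x : Int => x)
  have hcountS : ∀ x, srcs.count x = S.count x := fun x => hsrcsPerm.count_eq x
  have hcountT : ∀ x, tgts.count x = T.count x := fun x => htgtsPerm.count_eq x
  have hmemS : ∀ x, x ∈ srcs ↔ x ∈ S := fun x => hsrcsPerm.mem_iff
  have hmemT : ∀ x, x ∈ tgts ↔ x ∈ T := fun x => htgtsPerm.mem_iff
  -- B's scan and sticks via the characterizations
  have hscan := pvScan_char srcs.length srcs tgts 0 0 (le_refl _) hsrcsSorted htgtsSorted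
  have hsticks := pvSticks_char tgts.length srcs tgts (le_refl _) hsrcsSorted htgtsSorted
  -- rewrite B's scan predicates through the counts of the unsorted lists
  have hscanPredR : (fun x => decide (2 ≤ srcs.count x ∧ tgts.count x = 0)) = pK := by
    funext x
    show _ = decide (2 ≤ (S.count x : Int) ∧ (T.count x : Int) = 0)
    rw [hcountS x, hcountT x]
    simp only [decide_eq_decide]
    omega
  have hscanPredE : (fun x => decide (2 ≤ srcs.count x ∧ 2 ≤ tgts.count x)) = rK := by
    funext x
    show _ = decide (2 ≤ (S.count x : Int) ∧ 2 ≤ (T.count x : Int))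
    rw [hcountS x, hcountT x]
    simp only [decide_eq_decide]
    omega
  -- ---- the root both sides pick, using uniqueness from Pre_ ----
  have hpKmemS : ∀ x, pK x = true → x ∈ S := by
    intro x hx
    rw [hpK] at hx
    simp only [decide_eq_true_eq] at hx
    have h1 : 2 ≤ (S.count x : Int) := hx.1
    exact List.count_pos_iff.1 (by omega)
  have hLA : ((PySem.Set.ofList (pvSrcList edges)).filter (pvIsRoot edges)) =
      (PySem.Set.ofList S).filter pK := by
    rw [hSsrc]
    apply List.filter_congr
    intro x _
    show pvIsRoot edges x = decide (2 ≤ (S.count x : Int) ∧ (T.count x : Int) = 0)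
    rw [pvIsRoot, hSsrc, hTtgt]
    by_cases h1 : 2 ≤ S.count x <;> by_cases h2 : T.count x = 0 <;>
      simp [h1, h2]
  have hLAnodup : ((PySem.Set.ofList S).filter pK).Nodup := (PySem.Set.nodup_ofList S).filter _
  have hLAshort : ((PySem.Set.ofList S).filter pK).length ≤ 1 := by
    rw [← hLA]; exact hpre3
  have hLAmem : ∀ x, x ∈ (PySem.Set.ofList S).filter pK ↔ (x ∈ S ∧ pK x = true) := by
    intro x
    rw [List.mem_filter, PySem.Set.mem_ofList]
  -- A's candidate list equals the Pre_ one
  have hKfilter : cnt.keys.filter pK = (PySem.Set.ofList S).filter pK := by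
    symm
    apply pvFilter_eq_of_short hLAnodup (hA3.filter _)
    · intro x
      rw [hLAmem, List.mem_filter, hmem x]
      constructor
      · rintro ⟨h1, h2⟩; exact ⟨Or.inl h1, h2⟩
      · rintro ⟨_, h2⟩; exact ⟨hpKmemS x h2, h2⟩
    · exact hLAshort
  -- B's candidate list equals the Pre_ one
  have hHfilter : (pvHeads srcs).filter pK = (PySem.Set.ofList S).filter pK := by
    symm
    apply pvFilter_eq_of_short hLAnodup ((pvHeads_nodup srcs hsrcsSorted).filter _)
    · intro x
      rw [hLAmem, List.mem_filter, pvMem_heads_iff srcs hsrcsSorted, hmemS x]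
    · exact hLAshort
  have hrootB : ((pvHeads srcs).filter pK).getLastD 0 = rootV := by
    rw [hHfilter, hrootV, hKfilter]
  -- ---- sticks agree ----
  have hsticksEq : (pvHeads tgts).countP (fun x => !(decide (x ∈ srcs))) = sA := by
    rw [hsA]
    symm
    apply pvCountP_eq_of_set_eq hA3 (pvHeads_nodup tgts htgtsSorted)
    intro x
    rw [pvMem_heads_iff tgts htgtsSorted, hmemT x, hmem x]
    constructor
    · rintro ⟨_, hq⟩
      rw [hqK] at hq
      simp only [decide_eq_true_eq] at hq
      have hc1 : S.count x = 0 := by exact_mod_cast hq.1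
      have hc2 : 1 ≤ T.count x := by exact_mod_cast hq.2
      have hxT : x ∈ T := List.count_pos_iff.1 (by omega)
      have hxS : x ∉ S := by
        intro hxS
        have := List.count_pos_iff.2 hxS
        omega
      refine ⟨hxT, ?_⟩
      have : x ∉ srcs := by rw [hmemS x]; exact hxS
      simpa using this
    · rintro ⟨hxT, hb⟩
      have hxS : x ∉ S := by
        have hns : x ∉ srcs := by simpa using hb
        rw [hmemS x] at hns
        exact hns
      have hc1 : S.count x = 0 := List.count_eq_zero.2 hxS
      have hc2 : 0 < T.count x := List.count_pos_iff.2 hxT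
      refine ⟨Or.inr hxT, ?_⟩
      rw [hqK]
      simp only [decide_eq_true_eq]
      constructor
      · omega
      · omega
  -- ---- eights agree ----
  have heightsEq : (pvHeads srcs).countP rK = eA := by
    rw [heA]
    symm
    apply pvCountP_eq_of_set_eq hA3 (pvHeads_nodup srcs hsrcsSorted)
    intro x
    rw [pvMem_heads_iff srcs hsrcsSorted, hmemS x, hmem x]
    constructor
    · rintro ⟨_, hr⟩
      have hxS : x ∈ S := by
        rw [hrK] at hr
        simp only [decide_eq_true_eq] at hr
        have h1 : 2 ≤ (S.count x : Int) := hr.1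
        exact List.count_pos_iff.1 (by omega)
      exact ⟨hxS, hr⟩
    · rintro ⟨h1, hr⟩
      exact ⟨Or.inl h1, hr⟩
  -- ---- assemble B ----
  have hscan' : pvScan srcs tgts 0 0 = (rootV, (eA : Int)) := by
    rw [hscan, hscanPredR, hscanPredE, hrootB, heightsEq]
    norm_num
  have hsticks' : pvSticks srcs tgts = (sA : Int) := by
    rw [hsticks, hsticksEq]
  have hsolB : solution_alt edges =
      [rootV, (srcs.count rootV : Int) - (sA : Int) - (eA : Int), (sA : Int), (eA : Int)] := by
    show (let srcs' := PySem.List.sorted (edges.map (fun e => e.headD 0)) (fun x => x) false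
          let tgts' := PySem.List.sorted (edges.map (fun e => e.getD 1 0)) (fun x => x) false
          let re := pvScan srcs' tgts' 0 0
          let sticks := pvSticks srcs' tgts'
          let rout := srcs'.foldl (fun c s => if s = re.1 then c + 1 else c) (0 : Int)
          [re.1, rout - sticks - re.2, sticks, re.2]) = _
    simp only [← hsrcs, ← htgts, hscan', hsticks']
    rw [pvFoldCountEq srcs rootV 0]
    norm_num
  rw [hsolA, hsolB, hcountS rootV,
    show ((S.count rootV : Int) - ((sA : Int) + (eA : Int))) =
      ((S.count rootV : Int) - (sA : Int) - (eA : Int)) from by ring]
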